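-- pv_equiv track=rewrite | github.com/patastronch/aoc | 2021/17.py | get_touch_x
-- ===== SOURCE A (Python) =====
-- def get_hits_x(v):
--     r = 0
--     res = []
--     for i in range(10000):
--         if v - i >= 0:
--             r += v - i
--         res.append(r)
--     return res
--
-- def get_touch_x(x1, x2):
--     x_tg = list(range(x1, x2 + 1))
--     x_touch = dict()
--     for x in range(4 * abs(x2) + 4):
--         l = get_hits_x(x)
--         for i in range(len(l)):
--             if l[i] in x_tg:
--                 x_touch[i + 1] = x_touch.get(i + 1, set()).union({x})
--     return x_touch
-- ===== SOURCE B (Python) =====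
-- def get_touch_x(x1, x2):
--     touch = dict()
--     for x in range(4 * abs(x2) + 4):
--         # closed form: after n steps (n <= x) the probe is at n*x - n*(n-1)//2,
--         # afterwards it stalls at the triangular number x*(x+1)//2
--         t = min(x, 10000)
--         for n in range(1, t + 1):
--             p = n * x - n * (n - 1) // 2
--             if x1 <= p <= x2:
--                 touch.setdefault(n, set()).add(x)
--         m = x * (x + 1) // 2
--         if x1 <= m <= x2:
--             for n in range(t + 1, 10001):
--                 touch.setdefault(n, set()).add(x)
--     return touch
-- ===== Notes on version B (the rewrite author's own statement) =====
-- stated objective: faster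
-- what changed: B replaces A's per-velocity 10000-step position simulation (building a 10000-element list and testing membership in the target list) by the closed-form position n*x - n*(n-1)//2 for n <= x, plus the stalled triangular value x*(x+1)//2 handled as one constant-range fill for all remaining steps.
import Mathlib
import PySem

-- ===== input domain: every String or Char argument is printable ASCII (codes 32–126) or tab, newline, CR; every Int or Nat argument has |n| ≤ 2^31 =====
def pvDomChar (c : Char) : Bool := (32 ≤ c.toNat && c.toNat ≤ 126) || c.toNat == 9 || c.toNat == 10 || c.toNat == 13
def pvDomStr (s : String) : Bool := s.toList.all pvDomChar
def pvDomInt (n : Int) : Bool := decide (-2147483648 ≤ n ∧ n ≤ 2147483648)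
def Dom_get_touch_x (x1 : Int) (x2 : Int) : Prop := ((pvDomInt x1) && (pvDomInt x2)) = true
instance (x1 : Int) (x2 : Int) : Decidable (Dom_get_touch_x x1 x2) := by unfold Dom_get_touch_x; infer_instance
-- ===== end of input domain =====

-- B replaces A's per-velocity 10000-step position simulation (position list + membership test
-- in the target list) by the closed-form position n*x - n*(n-1)//2 with the stalled triangular
-- value x*(x+1)//2 handled as one constant fill; objective: faster.


-- ===== PORT A =====
-- Loop bodies are named helpers; res.append(r) is ported as Array.push (same value sequence;
-- a Python list append is an array push); `for i in range(len(l)): ... l[i]` reads every index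
-- of l in order and is ported as enumerate(l).
def stepA (v : Int) (st : Int × Array Int) (i : Int) : Int × Array Int :=
  let r := if v - i ≥ 0 then st.1 + (v - i) else st.1
  (r, st.2.push r)

def get_hits_x (v : Int) : List Int :=
  (((PySem.List.pyRange 0 10000 1).foldl (stepA v) (0, (#[] : Array Int))).2).toList

-- `if l[i] in x_tg: x_touch[i+1] = x_touch.get(i+1, set()).union({x})`
def stepT (x_tg : List Int) (x : Int) (d : PySem.Dict Int (PySem.Set Int)) (iv : Int × Int) :
    PySem.Dict Int (PySem.Set Int) :=
  if iv.2 ∈ x_tg then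
    d.insert (iv.1 + 1) (PySem.Set.union (d.getD (iv.1 + 1) PySem.Set.empty) [x])
  else d

def outerA (x_tg : List Int) (d : PySem.Dict Int (PySem.Set Int)) (x : Int) :
    PySem.Dict Int (PySem.Set Int) :=
  let l := get_hits_x x
  (PySem.List.enumerate l).foldl (stepT x_tg x) d

def get_touch_x (x1 : Int) (x2 : Int) : List (Int × List Int) :=
  let x_tg := PySem.List.pyRange x1 (x2 + 1) 1
  let x_touch := (PySem.List.pyRange 0 (4 * |x2| + 4) 1).foldl (outerA x_tg) PySem.Dict.empty
  x_touch.items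

-- ===== PORT B =====
-- `touch.setdefault(n, set()).add(x)`
def insB (x : Int) (d : PySem.Dict Int (PySem.Set Int)) (n : Int) : PySem.Dict Int (PySem.Set Int) :=
  d.modify n PySem.Set.empty (fun s => PySem.Set.add s x)

def stepB1 (x1 x2 x : Int) (d : PySem.Dict Int (PySem.Set Int)) (n : Int) :
    PySem.Dict Int (PySem.Set Int) :=
  let p := n * x - PySem.Int.floordiv (n * (n - 1)) 2
  if x1 ≤ p ∧ p ≤ x2 then insB x d n else d

def outerB (x1 x2 : Int) (d : PySem.Dict Int (PySem.Set Int)) (x : Int) :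
    PySem.Dict Int (PySem.Set Int) :=
  let t := min x 10000
  let d := (PySem.List.pyRange 1 (t + 1) 1).foldl (stepB1 x1 x2 x) d
  let m := PySem.Int.floordiv (x * (x + 1)) 2
  if x1 ≤ m ∧ m ≤ x2 then (PySem.List.pyRange (t + 1) 10001 1).foldl (insB x) d else d

def get_touch_x_alt (x1 : Int) (x2 : Int) : List (Int × List Int) :=
  let touch := (PySem.List.pyRange 0 (4 * |x2| + 4) 1).foldl (outerB x1 x2) PySem.Dict.empty
  touch.items

-- ===== PRECONDITION & SPEC =====
def Spec_get_touch_x (x1 : Int) (x2 : Int) (out : List (Int × List Int)) : Prop := out = get_touch_x_alt x1 x2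
instance (x1 : Int) (x2 : Int) (out : List (Int × List Int)) : Decidable (Spec_get_touch_x x1 x2 out) := by unfold Spec_get_touch_x; infer_instance

-- ===== CLAIM (what is proved, stated in full; the proofs are below) =====
def Claim_equal_get_touch_x : Prop := ∀ (x1 : Int) (x2 : Int), Dom_get_touch_x x1 x2 → Spec_get_touch_x x1 x2 (get_touch_x x1 x2)

-- ===== LEMMAS AND PROOFS =====

-- hsum x n = the position of an x-velocity probe after n steps (A's running sum in Nat form)
def hsum (x : Nat) : Nat → Nat
  | 0 => 0
  | n + 1 => hsum x n + (x - n)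

theorem hsum_two (x n : Nat) (h : n ≤ x) :
    (2 * hsum x n : Int) = 2 * n * x - n * ((n : Int) - 1) := by
  induction n with
  | zero => simp [hsum]
  | succ n ih =>
    have hx : n ≤ x := Nat.le_of_succ_le h
    have ihh := ih hx
    simp only [hsum]
    push_cast [Nat.cast_sub hx]
    push_cast at ihh
    linear_combination ihh

theorem floordiv_two_of_eq (t a : Int) (h : a = 2 * t) : PySem.Int.floordiv a 2 = t := by
  rw [h, PySem.Int.floordiv_eq_ediv_of_pos (by norm_num)]
  exact Int.mul_ediv_cancel_left t (by norm_num)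

theorem hsum_closed (x n : Nat) (h : n ≤ x) :
    (hsum x n : Int) = (n : Int) * x - PySem.Int.floordiv ((n : Int) * ((n : Int) - 1)) 2 := by
  obtain ⟨t, ht⟩ : ∃ t : Int, (n : Int) * ((n : Int) - 1) = 2 * t := by
    rcases Int.even_mul_succ_self ((n : Int) - 1) with ⟨t, ht⟩
    exact ⟨t, by linear_combination ht⟩
  rw [floordiv_two_of_eq t _ ht]
  have h2 := hsum_two x n h
  linarith [h2, ht]

theorem hsum_stall (x n : Nat) (h : x ≤ n) : hsum x n = hsum x x := by
  induction n with
  | zero => have hx : x = 0 := Nat.le_zero.mp h; subst hx; rfl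
  | succ n ih =>
    rcases Nat.lt_or_ge x (n + 1) with hlt | hge
    · have hx : x ≤ n := Nat.lt_succ_iff.mp hlt
      have hz : x - n = 0 := Nat.sub_eq_zero_of_le hx
      simp [hsum, hz, ih hx]
    · have : x = n + 1 := le_antisymm h hge
      subst this; rfl

theorem hsum_stall_closed (x : Nat) :
    (hsum x x : Int) = PySem.Int.floordiv ((x : Int) * ((x : Int) + 1)) 2 := by
  obtain ⟨t, ht⟩ : ∃ t : Int, (x : Int) * ((x : Int) + 1) = 2 * t := by
    rcases Int.even_mul_succ_self (x : Int) with ⟨t, ht⟩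
    exact ⟨t, by linear_combination ht⟩
  rw [floordiv_two_of_eq t _ ht]
  have h2 := hsum_two x x le_rfl
  nlinarith [h2, ht]

-- A's simulation loop, characterised: state after n steps
theorem loopA (x : Nat) (n : Nat) :
    (List.range n).foldl (fun (st : Int × Array Int) (k : Nat) => stepA (x : Int) st (k : Int)) (0, (#[] : Array Int))
      = ((hsum x n : Int), ((List.range n).map (fun i => (hsum x (i + 1) : Int))).toArray) := by
  induction n with
  | zero => simp [hsum]
  | succ n ih =>
    rw [List.range_succ, List.foldl_append, ih]
    simp only [List.foldl_cons, List.foldl_nil, stepA, List.map_append, List.map_cons,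
      List.map_nil]
    by_cases hc : n ≤ x
    · have hge : (x : Int) - n ≥ 0 := by
        have : (n : Int) ≤ x := by exact_mod_cast hc
        omega
      rw [if_pos hge]
      have hr : (hsum x n : Int) + ((x : Int) - n) = (hsum x (n + 1) : Int) := by
        simp only [hsum]
        push_cast [Nat.cast_sub hc]
        ring
      rw [hr, List.push_toArray]
    · have hlt : ¬ ((x : Int) - n ≥ 0) := by
        have : (x : Int) < n := by exact_mod_cast Nat.lt_of_not_le hc
        omega
      rw [if_neg hlt]
      have hr : (hsum x n : Int) = (hsum x (n + 1) : Int) := by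
        have hz : x - n = 0 := Nat.sub_eq_zero_of_le (Nat.le_of_not_le hc)
        simp [hsum, hz]
      rw [hr, List.push_toArray]

theorem get_hits_x_eq (x : Nat) :
    get_hits_x (x : Int) = (List.range 10000).map (fun i => (hsum x (i + 1) : Int)) := by
  unfold get_hits_x
  rw [show ((10000 : Int)) = ((10000 : Nat) : Int) from by norm_cast,
    PySem.List.pyRange_zero_natCast, List.foldl_map, loopA x 10000]

theorem enum_append {α : Type} (l : List α) (a : α) (s : Int) :
    PySem.List.enumerate (l ++ [a]) s = PySem.List.enumerate l s ++ [(s + l.length, a)] := by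
  induction l generalizing s with
  | nil => simp [PySem.List.enumerate]
  | cons b l ih =>
    simp [PySem.List.enumerate, ih (s + 1)]
    omega

theorem enum_map_range {α : Type} (f : Nat → α) (n : Nat) :
    PySem.List.enumerate ((List.range n).map f) 0
      = (List.range n).map (fun (k : Nat) => ((k : Int), f k)) := by
  induction n with
  | zero => simp
  | succ n ih =>
    rw [List.range_succ, List.map_append, List.map_append]

    simp only [List.map_cons, List.map_nil]
    rw [enum_append, ih]
    simp

-- the two ways of adding x to the value set of key n are the same dict operation
theorem ins_eq (d : PySem.Dict Int (PySem.Set Int)) (n x : Int) :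
    d.insert n (PySem.Set.union (d.getD n PySem.Set.empty) [x]) = insB x d n := rfl

-- canonical per-velocity loop: one conditional insert per step number
def cstep (x1 x2 : Int) (x : Nat) (dd : PySem.Dict Int (PySem.Set Int)) (k : Nat) :
    PySem.Dict Int (PySem.Set Int) :=
  if x1 ≤ (hsum x (k + 1) : Int) ∧ (hsum x (k + 1) : Int) ≤ x2 then insB (x : Int) dd ((k : Int) + 1) else dd

theorem A_to_c (x1 x2 : Int) (x : Nat) (d : PySem.Dict Int (PySem.Set Int)) :
    outerA (PySem.List.pyRange x1 (x2 + 1) 1) d (x : Int)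
      = (List.range 10000).foldl (cstep x1 x2 x) d := by
  simp only [outerA]
  rw [get_hits_x_eq, enum_map_range, List.foldl_map]
  refine PySem.List.foldl_congr_mem _ _ _ _ ?_
  intro acc k _
  simp only [stepT, cstep, PySem.List.mem_pyRange_one, Int.lt_add_one_iff, ins_eq]

theorem B_to_c (x1 x2 : Int) (x : Nat) (d : PySem.Dict Int (PySem.Set Int)) :
    outerB x1 x2 d (x : Int)
      = (List.range 10000).foldl (cstep x1 x2 x) d := by
  have ht10 : min x 10000 ≤ 10000 := Nat.min_le_right x 10000
  have htx : min x 10000 ≤ x := Nat.min_le_left x 10000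
  simp only [outerB]
  have hmin : (min ((x : Nat) : Int) 10000) = ((min x 10000 : Nat) : Int) := by push_cast; rfl
  have e1 : ((((min x 10000 : Nat) : Int)) + 1 - 1).toNat = min x 10000 := by omega
  have e2 : ((10001 : Int) - ((((min x 10000 : Nat) : Int)) + 1)).toNat = 10000 - min x 10000 := by
    omega
  rw [hmin, PySem.List.pyRange_one 1, PySem.List.pyRange_one (((min x 10000 : Nat) : Int) + 1), e1, e2,
    List.foldl_map, List.foldl_map]
  -- split the canonical loop at min x 10000
  have h0 : (10000 : Nat) = min x 10000 + (10000 - min x 10000) := by omega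
  have hsplit : List.range 10000
      = List.range (min x 10000) ++ (List.range (10000 - min x 10000)).map (fun k => min x 10000 + k) :=
    (congrArg List.range h0).trans List.range_add
  rw [hsplit, List.foldl_append, List.foldl_map]
  -- the rising part: closed form = canonical
  have hchunk1 : List.foldl (fun acc (k : Nat) => stepB1 x1 x2 (x : Int) acc (1 + (k : Int))) d (List.range (min x 10000))
      = List.foldl (fun acc (k : Nat) => cstep x1 x2 x acc k) d (List.range (min x 10000)) := by
    refine PySem.List.foldl_congr_mem _ _ _ _ ?_
    intro acc k hk
    have hkx : k + 1 ≤ x := by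
      have := List.mem_range.mp hk
      omega
    have hp : (1 + (k : Int)) * (x : Int)
        - PySem.Int.floordiv ((1 + (k : Int)) * ((1 + (k : Int)) - 1)) 2 = (hsum x (k + 1) : Int) := by
      have hc := hsum_closed x (k + 1) hkx
      push_cast at hc
      rw [show ((1 : Int) + (k : Int)) - 1 = (k : Int) from by ring, hc]
      ring_nf
    simp only [stepB1, hp, cstep]
    rw [show ((1 : Int) + (k : Int)) = ((k : Int) + 1) from by ring]
  rw [hchunk1]
  -- the stalled part
  set D := List.foldl (fun acc (k : Nat) => cstep x1 x2 x acc k) d (List.range (min x 10000)) with hD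
  have hm : PySem.Int.floordiv ((x : Int) * ((x : Int) + 1)) 2 = (hsum x x : Int) :=
    (hsum_stall_closed x).symm
  rw [hm]
  by_cases hx : 10000 ≤ x
  · have hz : 10000 - min x 10000 = 0 := by omega
    simp [hz]
  · have htx' : min x 10000 = x := by omega
    by_cases hC : x1 ≤ (hsum x x : Int) ∧ (hsum x x : Int) ≤ x2
    · rw [if_pos hC]
      refine (PySem.List.foldl_congr_mem _ _ _ _ ?_).symm
      intro acc k _
      have hst : hsum x (min x 10000 + k + 1) = hsum x x := hsum_stall x _ (by omega)
      simp only [cstep, hst]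
      rw [if_pos hC,
        show ((min x 10000 + k : Nat) : Int) + 1 = ((min x 10000 : Nat) : Int) + 1 + (k : Int) from by
          push_cast; ring]
    · rw [if_neg hC]
      refine Eq.symm ((PySem.List.foldl_congr_mem (List.range (10000 - min x 10000))
        (fun acc y => cstep x1 x2 x acc (min x 10000 + y)) (fun acc _ => acc) D ?_).trans
        (PySem.List.foldl_ignore _ _))
      intro acc k _
      have hst : hsum x (min x 10000 + k + 1) = hsum x x := hsum_stall x _ (by omega)
      simp only [cstep, hst]
      rw [if_neg hC]

-- per-velocity equality of the two loop bodies
theorem body_eq (x1 x2 : Int) (x : Nat) (d : PySem.Dict Int (PySem.Set Int)) :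
    outerA (PySem.List.pyRange x1 (x2 + 1) 1) d (x : Int) = outerB x1 x2 d (x : Int) :=
  (A_to_c x1 x2 x d).trans (B_to_c x1 x2 x d).symm

theorem get_touch_x_spec_aux (x1 x2 : Int) : get_touch_x x1 x2 = get_touch_x_alt x1 x2 := by
  unfold get_touch_x get_touch_x_alt
  refine congrArg PySem.Dict.items ?_
  refine PySem.List.foldl_congr_mem _ _ _ _ ?_
  intro acc x hx
  have hx0 : 0 ≤ x := ((PySem.List.mem_pyRange_one).mp hx).1
  have : x = ((x.toNat : Nat) : Int) := (Int.toNat_of_nonneg hx0).symm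
  rw [this]
  exact body_eq x1 x2 x.toNat acc

-- ===== VERDICT (by name: the statement is the Claim_ definition above) =====
theorem get_touch_x_spec : Claim_equal_get_touch_x := by
  intro x1 x2 _
  unfold Spec_get_touch_x
  exact get_touch_x_spec_aux x1 x2
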